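-- pv_equiv track=rewrite | github.com/syunyafukuda/Hull-Tactical---Market-Prediction | src/feature_generation/su4/feature_su4.py | _infer_group
-- ===== SOURCE A (Python) =====
-- def _infer_group(column_name: str) -> str | None:
-- 	"""列名の接頭辞から特徴グループを推定する。"""
-- 	prefix_chars: list[str] = []
-- 	for char in column_name:
-- 		if char.isalpha() and char.isupper():
-- 			prefix_chars.append(char)
-- 			continue
-- 		if char.isdigit():
-- 			break
-- 		# 英数字以外が出現した場合は規約外列とみなす。
-- 		return None
--
-- 	if not prefix_chars:
-- 		return None
--
-- 	# 複数文字の接頭辞もそのままグループ識別子とする。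
-- 	return "".join(prefix_chars)
-- ===== SOURCE B (Python) =====
-- from itertools import takewhile
--
--
-- def _infer_group(column_name: str) -> str | None:
-- 	"""Locate-then-validate: take the prefix up to the first digit, then check it."""
-- 	prefix = "".join(takewhile(lambda c: not c.isdigit(), column_name))
-- 	if prefix and all(c.isalpha() and c.isupper() for c in prefix):
-- 		return prefix
-- 	return None
-- ===== Notes on version B (the rewrite author's own statement) =====
-- stated objective: simpler
-- what changed: Replaced the single branch-heavy accumulator loop by a two-phase locate-then-validate shape: take the prefix before the first digit with takewhile, then validate it with all(isalpha and isupper).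
import Mathlib
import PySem

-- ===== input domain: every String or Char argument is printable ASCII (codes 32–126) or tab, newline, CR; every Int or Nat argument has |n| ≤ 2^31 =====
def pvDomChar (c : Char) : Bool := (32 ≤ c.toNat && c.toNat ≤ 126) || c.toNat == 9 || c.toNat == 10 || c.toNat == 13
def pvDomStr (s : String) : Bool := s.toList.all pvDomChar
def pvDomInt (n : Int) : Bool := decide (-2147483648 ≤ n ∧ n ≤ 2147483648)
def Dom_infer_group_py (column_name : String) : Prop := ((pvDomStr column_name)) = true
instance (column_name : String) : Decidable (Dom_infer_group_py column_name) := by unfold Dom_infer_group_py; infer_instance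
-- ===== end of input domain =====

-- B replaces A's branch-heavy accumulator loop by a locate-then-validate decomposition (simpler, same cost).

-- ===== PORT A =====
-- the for-loop of A: returns none on the early `return None`, otherwise the accumulated prefix_chars at break/loop-end
def inferGroupLoop (acc : List Char) (cs : List Char) : Option (List Char) :=
  match cs with
  | [] => some acc
  | c :: rest =>
    if PySem.Chars.isalpha c && PySem.Chars.isupper c then inferGroupLoop (acc ++ [c]) rest
    else if PySem.Chars.isdigit c then some acc
    else none

def infer_group_py (column_name : String) : Option String :=
  match inferGroupLoop [] column_name.toList with
  | none => none
  | some prefix_chars => if prefix_chars.isEmpty then none else some (String.ofList prefix_chars)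

-- ===== PORT B =====
def infer_group_py_alt (column_name : String) : Option String :=
  let pre := column_name.toList.takeWhile (fun c => !PySem.Chars.isdigit c)
  if !pre.isEmpty && pre.all (fun c => PySem.Chars.isalpha c && PySem.Chars.isupper c) then
    some (String.ofList pre)
  else none

-- ===== PRECONDITION & SPEC =====
def Spec_infer_group_py (column_name : String) (out : Option String) : Prop := out = infer_group_py_alt column_name
instance (column_name : String) (out : Option String) : Decidable (Spec_infer_group_py column_name out) := by unfold Spec_infer_group_py; infer_instance

-- ===== CLAIM (what is proved, stated in full; the proofs are below) =====
def Claim_equal_infer_group_py : Prop := ∀ (column_name : String), Dom_infer_group_py column_name → Spec_infer_group_py column_name (infer_group_py column_name)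

-- ===== LEMMAS AND PROOFS =====

lemma alpha_not_digit (c : Char) (h : PySem.Chars.isalpha c = true) : PySem.Chars.isdigit c = false := by
  by_contra hd
  simp only [Bool.not_eq_false] at hd
  simp only [PySem.Chars.isdigit, Bool.and_eq_true, decide_eq_true_eq] at hd
  simp only [PySem.Chars.isalpha, PySem.Chars.isupper, PySem.Chars.islower, Bool.or_eq_true,
    Bool.and_eq_true, decide_eq_true_eq] at h
  rcases h with ⟨h1, _⟩ | ⟨h1, _⟩
  · exact absurd (le_trans h1 hd.2) (by decide)
  · exact absurd (le_trans h1 hd.2) (by decide)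

lemma loop_eq (cs acc : List Char)
    (hacc : acc.all (fun c => PySem.Chars.isalpha c && PySem.Chars.isupper c) = true) :
    (match inferGroupLoop acc cs with
     | none => none
     | some p => if p.isEmpty then none else some (String.ofList p))
    = (let pre := acc ++ cs.takeWhile (fun c => !PySem.Chars.isdigit c)
       if !pre.isEmpty && pre.all (fun c => PySem.Chars.isalpha c && PySem.Chars.isupper c) then
         some (String.ofList pre)
       else none) := by
  induction cs generalizing acc with
  | nil =>
    simp only [inferGroupLoop, List.takeWhile_nil, List.append_nil]
    by_cases he : acc.isEmpty
    · simp [he]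
    · simp [he, hacc]
  | cons c rest ih =>
    by_cases hg : (PySem.Chars.isalpha c && PySem.Chars.isupper c) = true
    · have hd : PySem.Chars.isdigit c = false :=
        alpha_not_digit c (by simpa using (Bool.and_eq_true _ _ |>.mp hg).1)
      have hacc' : (acc ++ [c]).all (fun c => PySem.Chars.isalpha c && PySem.Chars.isupper c) = true := by
        simp_all
      have := ih (acc ++ [c]) hacc'
      simp only [inferGroupLoop, hg, if_true] at *
      simpa [List.takeWhile_cons, hd] using this
    · simp only [inferGroupLoop, hg]
      by_cases hd : PySem.Chars.isdigit c = true
      · simp only [hd, if_true, List.takeWhile_cons]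
        by_cases he : acc.isEmpty
        · simp [he]
        · simp [he, hacc]
      · have hd' : PySem.Chars.isdigit c = false := by simpa using hd
        simp [hd', hg]

-- ===== VERDICT (by name: the statement is the Claim_ definition above) =====
theorem infer_group_py_spec : Claim_equal_infer_group_py := by
  intro s _
  unfold Spec_infer_group_py infer_group_py infer_group_py_alt
  simpa using loop_eq s.toList [] rfl
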